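-- pv_equiv track=rewrite | github.com/YunYun501/Lazy-Learn-V2 | backend/app/services/content_extractor.py | _batch_contiguous
-- ===== SOURCE A (Python) =====
-- def _batch_contiguous(chapters: list[dict]) -> list[list[dict]]:
--     batches: list[list[dict]] = []
--     current: list[dict] = []
--     for chapter in chapters:
--         if not current:
--             current = [chapter]
--             continue
--         previous = current[-1]
--         if previous["page_end"] + 1 == chapter["page_start"]:
--             current.append(chapter)
--         else:
--             batches.append(current)
--             current = [chapter]
--     if current:
--         batches.append(current)
--     return batches
-- ===== SOURCE B (Python) =====
-- def _batch_contiguous(chapters: list[dict]) -> list[list[dict]]: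
--     cuts = [i + 1 for i, (prev, nxt) in enumerate(zip(chapters, chapters[1:]))
--             if prev["page_end"] + 1 != nxt["page_start"]]
--     bounds = [0] + cuts + [len(chapters)]
--     return [chapters[a:b] for a, b in zip(bounds, bounds[1:]) if b > a]
-- ===== Notes on version B (the rewrite author's own statement) =====
-- stated objective: alternative
-- what changed: B precomputes all break indices by scanning consecutive pairs, then partitions the list by slicing between boundary indices, instead of A's single pass that grows and flushes a running buffer.
import Mathlib
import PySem

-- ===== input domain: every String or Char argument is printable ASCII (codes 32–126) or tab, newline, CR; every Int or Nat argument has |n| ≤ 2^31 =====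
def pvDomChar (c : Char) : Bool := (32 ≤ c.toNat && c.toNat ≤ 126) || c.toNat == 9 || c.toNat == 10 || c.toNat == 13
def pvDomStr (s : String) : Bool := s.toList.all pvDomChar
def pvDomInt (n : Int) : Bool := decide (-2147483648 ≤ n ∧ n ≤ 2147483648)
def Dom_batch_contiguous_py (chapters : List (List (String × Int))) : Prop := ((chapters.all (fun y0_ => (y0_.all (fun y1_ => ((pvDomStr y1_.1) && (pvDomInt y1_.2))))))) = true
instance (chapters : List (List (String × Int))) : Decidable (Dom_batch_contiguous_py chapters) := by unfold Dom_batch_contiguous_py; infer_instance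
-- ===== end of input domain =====

-- B re-implements the grouping by computing all break indices first and then slicing the list
-- between consecutive boundaries, instead of A's running buffer that is grown and flushed;
-- a different decomposition of the same O(n) task.

-- ===== PORT A =====
-- shared helper: the adjacency test previous["page_end"] + 1 == chapter["page_start"]
def pvAdj (previous chapter : List (String × Int)) : Bool :=
  PySem.Dict.getD ⟨previous⟩ "page_end" 0 + 1 == PySem.Dict.getD ⟨chapter⟩ "page_start" 0

-- the body of A's for-loop, acting on the state (batches, current)
def pvStepA (st : List (List (List (String × Int))) × List (List (String × Int)))
    (chapter : List (String × Int)) :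
    List (List (List (String × Int))) × List (List (String × Int)) :=
  if st.2.isEmpty then (st.1, [chapter])
  else
    let previous := PySem.List.pyGetD st.2 (-1) []   -- current[-1]; current is nonempty here
    if pvAdj previous chapter then (st.1, st.2 ++ [chapter])
    else (st.1 ++ [st.2], [chapter])

def batch_contiguous_py (chapters : List (List (String × Int))) : List (List (List (String × Int))) :=
  let st := chapters.foldl pvStepA ([], [])
  if st.2.isEmpty then st.1 else st.1 ++ [st.2]

-- ===== PORT B =====
def batch_contiguous_py_alt (chapters : List (List (String × Int))) : List (List (List (String × Int))) :=
  let cuts := ((PySem.List.enumerate (chapters.zip (PySem.List.slice chapters (some 1) none))).filter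
      (fun p => !pvAdj p.2.1 p.2.2)).map (fun p => p.1 + 1)
  let bounds := 0 :: cuts ++ [(chapters.length : Int)]
  ((bounds.zip (PySem.List.slice bounds (some 1) none)).filter (fun p => p.1 < p.2)).map
    (fun p => PySem.List.slice chapters (some p.1) (some p.2))

-- ===== PRECONDITION & SPEC =====
-- Pre_ excludes exactly the inputs on which A (and B alike) raises KeyError: some adjacent
-- pair where the left chapter lacks "page_end" or the right one lacks "page_start".
def Pre_batch_contiguous_py (chapters : List (List (String × Int))) : Prop :=
  List.IsChain (fun a b => ((PySem.Dict.get? (⟨a⟩ : PySem.Dict String Int) "page_end").isSome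
    && (PySem.Dict.get? (⟨b⟩ : PySem.Dict String Int) "page_start").isSome) = true) chapters
instance (chapters : List (List (String × Int))) : Decidable (Pre_batch_contiguous_py chapters) := by
  unfold Pre_batch_contiguous_py; infer_instance

def pvWitness_batch_contiguous_py : (List (List (String × Int))) :=
  [[("page_start", 1), ("page_end", 2)], [("page_start", 3), ("page_end", 4)], [("page_start", 9), ("page_end", 9)]]

def Spec_batch_contiguous_py (chapters : List (List (String × Int))) (out : List (List (List (String × Int)))) : Prop := out = batch_contiguous_py_alt chapters
instance (chapters : List (List (String × Int))) (out : List (List (List (String × Int)))) : Decidable (Spec_batch_contiguous_py chapters out) := by unfold Spec_batch_contiguous_py; infer_instance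

-- ===== CLAIM (what is proved, stated in full; the proofs are below) =====
def Claim_equal_batch_contiguous_py : Prop := ∀ (chapters : List (List (String × Int))), Dom_batch_contiguous_py chapters → Pre_batch_contiguous_py chapters → Spec_batch_contiguous_py chapters (batch_contiguous_py chapters)

-- ===== LEMMAS AND PROOFS =====

-- Reference recursion both ports are reduced to: peel off one maximal contiguous group.
def pvTakeGrp (p : List (String × Int)) :
    List (List (String × Int)) → List (List (String × Int)) × List (List (String × Int))
  | [] => ([], [])
  | c :: cs =>
    if pvAdj p c then
      let r := pvTakeGrp c cs
      (c :: r.1, r.2)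
    else ([], c :: cs)

theorem pvTakeGrp_append (p : List (String × Int)) (xs : List (List (String × Int))) :
    (pvTakeGrp p xs).1 ++ (pvTakeGrp p xs).2 = xs := by
  induction xs generalizing p with
  | nil => simp [pvTakeGrp]
  | cons c cs ih =>
    simp only [pvTakeGrp]
    split
    · simpa using ih c
    · simp

theorem pvTakeGrp_snd_le (p : List (String × Int)) (xs : List (List (String × Int))) :
    (pvTakeGrp p xs).2.length ≤ xs.length := by
  have h := pvTakeGrp_append p xs
  have := congrArg List.length h
  simp at this
  omega

def pvGrps : List (List (String × Int)) → List (List (List (String × Int)))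
  | [] => []
  | c :: cs =>
    (c :: (pvTakeGrp c cs).1) :: pvGrps (pvTakeGrp c cs).2
termination_by l => l.length
decreasing_by
  have := pvTakeGrp_snd_le c cs
  simp; omega

-- ---- A-side: the flush loop computes pvGrps ----

theorem pvA_loop (xs : List (List (String × Int))) :
    ∀ (bs : List (List (List (String × Int)))) (pre : List (List (String × Int)))
      (p : List (String × Int)),
      (let st := xs.foldl pvStepA (bs, pre ++ [p]);
        if st.2.isEmpty then st.1 else st.1 ++ [st.2]) =
      bs ++ ((pre ++ [p]) ++ (pvTakeGrp p xs).1) :: pvGrps (pvTakeGrp p xs).2 := by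
  induction xs with
  | nil =>
    intro bs pre p
    simp [pvTakeGrp, pvGrps]
  | cons c cs ih =>
    intro bs pre p
    simp only [List.foldl_cons]
    have hstep : pvStepA (bs, pre ++ [p]) c =
        if pvAdj p c then (bs, (pre ++ [p]) ++ [c]) else (bs ++ [pre ++ [p]], [c]) := by
      simp [pvStepA, PySem.List.pyGetD_neg_one_append_singleton]
    rw [hstep]
    by_cases h : pvAdj p c
    · simp only [h, if_pos]
      have := ih bs (pre ++ [p]) c
      simp only [this]
      simp only [pvTakeGrp, h, if_pos]
      simp
    · simp only [h, if_neg, Bool.false_eq_true, not_false_iff]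
      have := ih (bs ++ [pre ++ [p]]) [] c
      simp only [List.nil_append] at this
      rw [this]
      simp only [pvTakeGrp, h, if_neg, Bool.false_eq_true, not_false_iff]
      rw [pvGrps]
      simp

theorem pvA_eq_grps (l : List (List (String × Int))) :
    batch_contiguous_py l = pvGrps l := by
  cases l with
  | nil => simp [batch_contiguous_py, pvGrps]
  | cons c cs =>
    unfold batch_contiguous_py
    simp only [List.foldl_cons]
    have h0 : pvStepA ([], []) c = ([], [c]) := by simp [pvStepA]
    rw [h0]
    have := pvA_loop cs [] [] c
    simp only [List.nil_append] at this
    rw [this]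
    rw [pvGrps]
    simp

-- ---- B-side: cut indices and boundary slicing compute pvGrps too ----

def pvCuts (l : List (List (String × Int))) : List Int :=
  ((PySem.List.enumerate (l.zip (PySem.List.slice l (some 1) none))).filter
      (fun p => !pvAdj p.2.1 p.2.2)).map (fun p => p.1 + 1)

def pvPartB (l : List (List (String × Int))) (bounds : List Int) : List (List (List (String × Int))) :=
  ((bounds.zip (PySem.List.slice bounds (some 1) none)).filter
    (fun p => p.1 < p.2)).map (fun p => PySem.List.slice l (some p.1) (some p.2))

def pvPart (l : List (List (String × Int))) (cuts : List Int) : List (List (List (String × Int))) :=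
  (((0 :: cuts ++ [(l.length : Int)]).zip
      (PySem.List.slice (0 :: cuts ++ [(l.length : Int)]) (some 1) none)).filter
    (fun p => p.1 < p.2)).map (fun p => PySem.List.slice l (some p.1) (some p.2))

theorem pvAlt_eq_part (l : List (List (String × Int))) :
    batch_contiguous_py_alt l = pvPart l (pvCuts l) := rfl

theorem pvEnumerate_succ {α : Type} (xs : List α) (s : Int) :
    PySem.List.enumerate xs (s + 1) = (PySem.List.enumerate xs s).map (fun p => (p.1 + 1, p.2)) := by
  induction xs generalizing s with
  | nil => simp [PySem.List.enumerate_nil]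
  | cons x xs ih => simp [PySem.List.enumerate_cons, ih]

theorem pvCuts_singleton (a : List (String × Int)) : pvCuts [a] = [] := by
  simp [pvCuts, PySem.List.slice_from_one, PySem.List.enumerate_nil]

theorem pvCuts_cons2 (a b : List (String × Int)) (t : List (List (String × Int))) :
    pvCuts (a :: b :: t) =
      (if pvAdj a b then [] else [1]) ++ (pvCuts (b :: t)).map (· + 1) := by
  simp only [pvCuts, PySem.List.slice_from_one, List.tail_cons, List.zip_cons_cons,
    PySem.List.enumerate_cons]
  rw [show (0 : Int) + 1 = 0 + 1 by rfl, pvEnumerate_succ]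
  rw [List.filter_cons]
  rw [List.filter_map]
  by_cases h : pvAdj a b <;> simp [h, Function.comp_def]

theorem pvCuts_nonneg (l : List (List (String × Int))) :
    ∀ x ∈ pvCuts l, (1 : Int) ≤ x := by
  intro x hx
  simp only [pvCuts, List.mem_map, List.mem_filter] at hx
  obtain ⟨p, ⟨hp, -⟩, rfl⟩ := hx
  rw [PySem.List.mem_enumerate_iff] at hp
  obtain ⟨k, hk, rfl⟩ := hp
  simp

theorem pvCuts_takeGrp (xs : List (List (String × Int))) :
    ∀ (p : List (String × Int)),
    pvCuts (p :: xs) =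
      if (pvTakeGrp p xs).2 = [] then []
      else (1 + (pvTakeGrp p xs).1.length : Int) ::
        (pvCuts (pvTakeGrp p xs).2).map (· + (1 + (pvTakeGrp p xs).1.length : Int)) := by
  induction xs with
  | nil => intro p; simp [pvCuts_singleton, pvTakeGrp]
  | cons c cs ih =>
    intro p
    rw [pvCuts_cons2, ih c]
    by_cases h : pvAdj p c
    · simp only [pvTakeGrp, h, if_pos]
      by_cases hr : (pvTakeGrp c cs).2 = []
      · simp [hr]
      · simp only [hr, if_neg, not_false_iff]
        simp [List.map_map, Function.comp_def]
        constructor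
        · ring
        · intro a _
          ring
    · simp only [pvTakeGrp, h, Bool.false_eq_true, if_neg, not_false_iff]
      rw [ih c]
      by_cases hr : (pvTakeGrp c cs).2 = [] <;> simp [hr]

theorem pvSlice_shift (g r : List (List (String × Int))) (a b : Int)
    (ha : 0 ≤ a) (hb : 0 ≤ b) :
    PySem.List.slice (g ++ r) (some (a + (g.length : Int))) (some (b + (g.length : Int))) =
      PySem.List.slice r (some a) (some b) := by
  rw [PySem.List.slice_toNat _ (by omega) (by omega), PySem.List.slice_toNat _ ha hb]
  have h1 : (a + (g.length : Int)).toNat = g.length + a.toNat := by omega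
  have h2 : (b + (g.length : Int)).toNat - (a + (g.length : Int)).toNat = b.toNat - a.toNat := by
    omega
  rw [h2, h1, List.drop_length_add_append]

theorem pvPart_nil_cuts (l : List (List (String × Int))) (hl : l ≠ []) : pvPart l [] = [l] := by
  have hpos : 0 < l.length := List.length_pos_of_ne_nil hl
  simp [pvPart, PySem.List.slice_from_one, hpos, PySem.List.slice_to_natCast]

theorem pvPartB_shift (g r : List (List (String × Int))) (hg : g ≠ [])
    (br : List Int) (hnn : ∀ x ∈ br, 0 ≤ x) :
    pvPartB (g ++ r) ((0 : Int) :: ((0 : Int) :: br).map (· + (g.length : Int))) =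
      g :: pvPartB r ((0 : Int) :: br) := by
  have hgpos : 0 < g.length := List.length_pos_of_ne_nil hg
  unfold pvPartB
  rw [PySem.List.slice_from_one, PySem.List.slice_from_one, List.tail_cons, List.tail_cons]
  rw [List.map_cons, List.zip_cons_cons]
  rw [show (List.map (fun x => x + (g.length : Int)) br) =
        (((0 : Int) :: br).map (fun x => x + (g.length : Int))).tail by simp]
  rw [show ((0 : Int) + (g.length : Int)) :: (((0 : Int) :: br).map (fun x => x + (g.length : Int))).tail =
        ((0 : Int) :: br).map (fun x => x + (g.length : Int)) by simp]
  rw [← List.map_tail, List.zip_map, List.tail_cons]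
  rw [List.filter_cons]
  have hhead : (decide ((0 : Int) < 0 + (g.length : Int))) = true := by simp; omega
  rw [hhead]
  simp only [if_pos]
  rw [List.filter_map]
  have hpred : ∀ q ∈ (((0 : Int) :: br).zip br),
      (((fun p : Int × Int => decide (p.1 < p.2)) ∘
        Prod.map (· + (g.length : Int)) (· + (g.length : Int))) q) = decide (q.1 < q.2) := by
    intro q _
    simp
  rw [List.filter_congr hpred]
  rw [List.map_cons, List.map_map]
  congr 1
  · rw [show ((0 : Int) + (g.length : Int)) = (g.length : Int) by ring]
    simp only [PySem.List.slice_zero_start, PySem.List.slice_to_natCast]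
    exact List.take_left
  · apply List.map_congr_left
    intro q hq
    have hq' := List.mem_filter.mp hq
    have hmem := List.of_mem_zip hq'.1
    have h1 : 0 ≤ q.1 := by
      rcases List.mem_cons.mp hmem.1 with h | h
      · omega
      · exact hnn _ h
    have h2 : 0 ≤ q.2 := hnn _ hmem.2
    simp only [Function.comp_def, Prod.map]
    exact pvSlice_shift g r q.1 q.2 h1 h2

theorem pvPart_cons_shift (g r : List (List (String × Int))) (hg : g ≠ [])
    (cuts : List Int) (hc : ∀ x ∈ cuts, 0 ≤ x) :
    pvPart (g ++ r) ((g.length : Int) :: cuts.map (· + (g.length : Int))) = g :: pvPart r cuts := by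
  have hnn : ∀ x ∈ cuts ++ [((r.length : Nat) : Int)], 0 ≤ x := by
    intro x hx
    rcases List.mem_append.mp hx with h | h
    · exact hc x h
    · simp at h; omega
  calc pvPart (g ++ r) ((g.length : Int) :: cuts.map (· + (g.length : Int)))
      = pvPartB (g ++ r)
          (0 :: ((g.length : Int) :: cuts.map (· + (g.length : Int))) ++ [(((g ++ r).length) : Int)]) := rfl
    _ = pvPartB (g ++ r) ((0 : Int) :: ((0 : Int) :: (cuts ++ [((r.length) : Int)])).map (· + (g.length : Int))) := by
        congr 1
        simp [List.length_append]
        ring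
    _ = g :: pvPartB r ((0 : Int) :: (cuts ++ [((r.length) : Int)])) := pvPartB_shift g r hg _ hnn
    _ = g :: pvPart r cuts := rfl

theorem pvB_eq_grps (l : List (List (String × Int))) :
    batch_contiguous_py_alt l = pvGrps l := by
  induction l using pvGrps.induct with
  | case1 =>
    have h : pvGrps [] = [] := by rw [pvGrps]
    rw [h]
    rfl
  | case2 c cs ih =>
    rw [pvAlt_eq_part, pvCuts_takeGrp]
    have hsplit : (c :: (pvTakeGrp c cs).1) ++ (pvTakeGrp c cs).2 = c :: cs := by
      simpa using pvTakeGrp_append c cs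
    by_cases hr : (pvTakeGrp c cs).2 = []
    · rw [if_pos hr]
      rw [pvPart_nil_cuts _ (by simp)]
      rw [pvGrps, hr, pvGrps]
      rw [← hsplit, hr]
      simp
    · rw [if_neg hr]
      have hk : (1 + ((pvTakeGrp c cs).1.length : Int)) = (((c :: (pvTakeGrp c cs).1)).length : Int) := by
        push_cast [List.length_cons]
        ring
      rw [hk]
      rw [show pvPart (c :: cs) = pvPart ((c :: (pvTakeGrp c cs).1) ++ (pvTakeGrp c cs).2) by rw [hsplit]]
      rw [pvPart_cons_shift _ _ (by simp) _
        (fun x hx => le_trans (by omega) (pvCuts_nonneg _ x hx))]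
      rw [← pvAlt_eq_part, ih]
      rw [pvGrps]

-- ===== VERDICT (by name: the statement is the Claim_ definition above) =====
theorem batch_contiguous_py_spec : Claim_equal_batch_contiguous_py := by
  intro chapters _ _
  unfold Spec_batch_contiguous_py
  rw [pvA_eq_grps, pvB_eq_grps]
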